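-- pv_equiv track=rewrite | github.com/nbratek/WDI | zestaw 2/zad11.py | f
-- ===== SOURCE A (Python) =====
-- def f(a):
--     r = a % 10
--     while a > 0:
--         a //= 10
--         p = a % 10
--         if r >= p:
--             r = p
--         else:
--             return False
--     return True
-- ===== SOURCE B (Python) =====
-- def f(a):
--     if a <= 0:
--         return True
--     s = str(a)
--     return s == ''.join(sorted(s))
-- ===== Notes on version B (the rewrite author's own statement) =====
-- stated objective: idiomatic
-- what changed: Replaces A's incremental least-significant-digit scan (repeated //10 and %10 with an early return) by the idiomatic whole-string test str(a) == ''.join(sorted(str(a))) behind a non-positive-input guard that returns True just as A's skipped loop does.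
import Mathlib
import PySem

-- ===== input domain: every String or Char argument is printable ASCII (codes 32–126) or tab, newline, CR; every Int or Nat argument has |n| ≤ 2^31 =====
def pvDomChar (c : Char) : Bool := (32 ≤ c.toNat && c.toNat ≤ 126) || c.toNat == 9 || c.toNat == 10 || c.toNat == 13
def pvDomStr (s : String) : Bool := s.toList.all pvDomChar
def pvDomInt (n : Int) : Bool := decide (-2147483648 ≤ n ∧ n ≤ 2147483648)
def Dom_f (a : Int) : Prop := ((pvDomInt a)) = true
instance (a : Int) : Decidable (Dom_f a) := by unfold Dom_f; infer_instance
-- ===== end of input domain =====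

-- B re-implements A's incremental digit scan as `str(a) == ''.join(sorted(str(a)))` behind an
-- `a <= 0` guard (idiomatic; equal return value on every int, proved below).

-- ===== PORT A =====
-- termination helper for the while loop (a //= 10 shrinks a positive a)
theorem pvFloordiv10_toNat_lt (a : Int) (h : 0 < a) : (PySem.Int.floordiv a 10).toNat < a.toNat := by
  rw [PySem.Int.floordiv_eq_ediv_of_pos (by norm_num)]
  omega

-- 'while a > 0: a //= 10; p = a % 10; if r >= p: r = p; else: return False' / 'return True'
def fLoop (a r : Int) : Bool :=
  if h : a > 0 then
    let a' := PySem.Int.floordiv a 10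
    let p := PySem.Int.mod a' 10
    if r ≥ p then fLoop a' p else false
  else true
termination_by a.toNat
decreasing_by exact pvFloordiv10_toNat_lt a h

def f (a : Int) : Bool := fLoop a (PySem.Int.mod a 10)

-- ===== PORT B =====
def f_alt (a : Int) : Bool :=
  if a ≤ 0 then true
  else
    let s := PySem.Int.toStr a
    s == String.ofList (PySem.List.sorted s.toList (fun c => c) false)

-- ===== PRECONDITION & SPEC =====
def Spec_f (a : Int) (out : Bool) : Prop := out = f_alt a
instance (a : Int) (out : Bool) : Decidable (Spec_f a out) := by unfold Spec_f; infer_instance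

-- ===== CLAIM (what is proved, stated in full; the proofs are below) =====
def Claim_equal_f : Prop := ∀ (a : Int), Dom_f a → Spec_f a (f a)

-- ===== LEMMAS AND PROOFS =====

-- the decimal digits of n, least significant first ([] for 0)
def natDigs (n : Nat) : List Nat :=
  if h : n = 0 then [] else n % 10 :: natDigs (n / 10)
termination_by n
decreasing_by exact Nat.div_lt_self (Nat.pos_of_ne_zero h) (by norm_num)

theorem natDigs_zero : natDigs 0 = [] := by rw [natDigs]; rfl

theorem natDigs_pos (n : Nat) (h : n ≠ 0) : natDigs n = n % 10 :: natDigs (n / 10) := by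
  conv_lhs => rw [natDigs]
  simp [h]

theorem natDigs_lt10 (n : Nat) : ∀ x ∈ natDigs n, x < 10 := by
  induction n using Nat.strong_induction_on with
  | _ n ih =>
    by_cases h : n = 0
    · subst h; simp [natDigs_zero]
    · rw [natDigs_pos n h]
      intro x hx
      rcases List.mem_cons.1 hx with rfl | hx
      · exact Nat.mod_lt _ (by norm_num)
      · exact ih (n / 10) (Nat.div_lt_self (Nat.pos_of_ne_zero h) (by norm_num)) x hx

-- core's toDigits emits exactly the digits of n, most significant first
theorem toDigitsCore_eq : ∀ (fuel n : Nat) (ds : List Char), 0 < fuel → n < 10 ^ fuel →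
    Nat.toDigitsCore 10 fuel n ds
      = ((if n = 0 then [0] else natDigs n).map Nat.digitChar).reverse ++ ds := by
  intro fuel
  induction fuel with
  | zero => intro n ds h; exact absurd h (lt_irrefl 0)
  | succ fl ih =>
    intro n ds _ hn
    rw [Nat.toDigitsCore]
    by_cases h10 : n / 10 = 0
    · rw [if_pos h10]
      by_cases h0 : n = 0
      · subst h0; simp
      · rw [if_neg h0, natDigs_pos n h0, h10, natDigs_zero]
        simp
    · rw [if_neg h10]
      have hfl : 0 < fl := by
        rcases Nat.eq_zero_or_pos fl with rfl | hp
        · exact absurd (Nat.div_eq_of_lt (by simpa using hn)) h10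
        · exact hp
      have hlt : n / 10 < 10 ^ fl := by
        rw [Nat.div_lt_iff_lt_mul (by norm_num)]
        calc n < 10 ^ (fl + 1) := hn
        _ = 10 ^ fl * 10 := by rw [pow_succ]
      rw [ih (n / 10) _ hfl hlt, if_neg h10, natDigs_pos n (by omega),
        if_neg (show ¬n = 0 by omega)]
      simp

theorem toChars_pos (a : Int) (h : 0 < a) :
    PySem.Int.toChars a = ((natDigs a.toNat).map Nat.digitChar).reverse := by
  unfold PySem.Int.toChars
  rw [if_neg (by omega), Nat.toDigits,
    toDigitsCore_eq (a.toNat + 1) a.toNat [] (Nat.succ_pos _)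
      (lt_of_lt_of_le (Nat.lt_pow_self (by norm_num))
        (Nat.pow_le_pow_right (by norm_num) (Nat.le_succ _))),
    if_neg (by omega)]
  simp

-- the while loop decides the ≥-chain on r followed by the remaining digits of a // 10
theorem fLoop_iff (n : Nat) : ∀ r : Int, 0 ≤ r →
    (fLoop (n : Int) r = true ↔
      List.IsChain (· ≥ ·) (r :: (natDigs (n / 10)).map (fun d : Nat => (d : Int)))) := by
  induction n using Nat.strong_induction_on with
  | _ n ih =>
    intro r hr
    rw [fLoop]
    by_cases h : (n : Int) > 0
    · rw [dif_pos h]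
      have hfd : PySem.Int.floordiv ((n : Int)) 10 = ((n / 10 : Nat) : Int) := by
        exact_mod_cast PySem.Int.floordiv_natCast n 10
      have hmd : PySem.Int.mod (((n / 10 : Nat) : Int)) 10 = ((n / 10 % 10 : Nat) : Int) := by
        exact_mod_cast PySem.Int.mod_natCast (n / 10) 10
      simp only [hfd, hmd]
      by_cases h10 : n / 10 = 0
      · rw [h10]
        have h0 : ((0 % 10 : Nat) : Int) = 0 := by norm_num
        rw [h0, if_pos (show r ≥ 0 from hr), fLoop]
        simp [natDigs_zero]
      · rw [natDigs_pos (n / 10) h10, List.map_cons, List.isChain_cons_cons]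
        have hlt : n / 10 < n := Nat.div_lt_self (by exact_mod_cast h) (by norm_num)
        by_cases hge : r ≥ ((n / 10 % 10 : Nat) : Int)
        · rw [if_pos hge,
            ih (n / 10) hlt ((n / 10 % 10 : Nat) : Int) (by positivity)]
          exact ⟨fun hc => ⟨hge, hc⟩, fun hc => hc.2⟩
        · rw [if_neg hge]
          constructor
          · intro hc; exact absurd hc (by simp)
          · intro hc; exact absurd hc.1 hge
    · rw [dif_neg h]
      have : n = 0 := by omega
      subst this
      simp [natDigs_zero]

-- characterisation of port A on positive input: the digit list (LSB first) is a ≥-chain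
theorem f_iff (a : Int) (h : 0 < a) :
    (f a = true ↔ List.IsChain (fun x y : Nat => x ≥ y) (natDigs a.toNat)) := by
  have hn : ((a.toNat : Int)) = a := Int.toNat_of_nonneg (le_of_lt h)
  unfold f
  have hmd : PySem.Int.mod ((a.toNat : Int)) 10 = ((a.toNat % 10 : Nat) : Int) := by
    exact_mod_cast PySem.Int.mod_natCast a.toNat 10
  rw [← hn, hmd, fLoop_iff a.toNat ((a.toNat % 10 : Nat) : Int) (by positivity)]
  simp only [Int.toNat_natCast]
  have hd : natDigs a.toNat = a.toNat % 10 :: natDigs (a.toNat / 10) :=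
    natDigs_pos a.toNat (by omega)
  rw [show (((a.toNat % 10 : Nat) : Int) :: (natDigs (a.toNat / 10)).map (fun d : Nat => (d : Int)))
        = (natDigs a.toNat).map (fun d : Nat => (d : Int)) by rw [hd]; simp,
    List.isChain_map]
  have : (fun x y : Nat => ((x : Int)) ≥ ((y : Int))) = (fun x y : Nat => x ≥ y) := by
    funext x y
    exact propext (by omega)
  rw [this]

-- digitChar is order-preserving on single digits
theorem digitChar_le (d₁ d₂ : Nat) (h₁ : d₁ < 10) (h₂ : d₂ < 10) :
    Nat.digitChar d₁ ≤ Nat.digitChar d₂ ↔ d₁ ≤ d₂ := by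
  interval_cases d₁ <;> interval_cases d₂ <;> decide

theorem isChain_digitChar (l : List Nat) (h : ∀ x ∈ l, x < 10) :
    List.IsChain (fun x y => Nat.digitChar y ≤ Nat.digitChar x) l ↔
      List.IsChain (fun x y : Nat => x ≥ y) l := by
  induction l with
  | nil => simp
  | cons a t ih =>
    cases t with
    | nil => simp
    | cons b t2 =>
      rw [List.isChain_cons_cons, List.isChain_cons_cons,
        ih (fun x hx => h x (List.mem_cons_of_mem a hx)),
        digitChar_le b a (h b (by simp)) (h a (by simp))]

-- characterisation of port B on positive input: same chain condition
theorem f_alt_iff (a : Int) (h : 0 < a) :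
    (f_alt a = true ↔ List.IsChain (fun x y : Nat => x ≥ y) (natDigs a.toNat)) := by
  unfold f_alt
  rw [if_neg (by omega)]
  simp only [beq_iff_eq]
  have htl : (PySem.Int.toStr a).toList = ((natDigs a.toNat).map Nat.digitChar).reverse := by
    rw [PySem.Int.toList_toStr, toChars_pos a h]
  constructor
  · intro he
    have hsl : (PySem.Int.toStr a).toList
        = PySem.List.sorted (PySem.Int.toStr a).toList (fun c => c) false := by
      conv_lhs => rw [he, String.toList_ofList]
    have hp := PySem.List.sorted_pairwise (PySem.Int.toStr a).toList (fun c => c)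
    rw [← hsl, htl] at hp
    have hc := List.isChain_iff_pairwise.2 hp
    rw [List.isChain_reverse, List.isChain_map] at hc
    exact (isChain_digitChar _ (natDigs_lt10 a.toNat)).1 hc
  · intro hc
    have hp : ((natDigs a.toNat).map Nat.digitChar).reverse.Pairwise (fun c d => c ≤ d) := by
      rw [← List.isChain_iff_pairwise, List.isChain_reverse, List.isChain_map]
      exact (isChain_digitChar _ (natDigs_lt10 a.toNat)).2 hc
    rw [← htl] at hp
    rw [PySem.List.sorted_eq_self_of_pairwise _ _ hp]
    exact String.ofList_toList.symm

-- ===== VERDICT (by name: the statement is the Claim_ definition above) =====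
theorem f_spec : Claim_equal_f := by
  unfold Claim_equal_f
  intro a _
  unfold Spec_f
  by_cases h : 0 < a
  · rw [Bool.eq_iff_iff, f_iff a h, f_alt_iff a h]
  · unfold f f_alt
    rw [fLoop, dif_neg h, if_pos (by omega)]
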